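-- pv_equiv track=rewrite | github.com/TALHY50/Quicksorting | Q1-Iterative&Recursive.py | chocolates_recursively
-- ===== SOURCE A (Python) =====
-- def chocolates_recursively(chocolates, students, distribution=None, index=0):
--     if distribution is None:
--         distribution = {}
--
--     if index < len(students):
--         student = students[index]
--         if chocolates:
--             distribution[student] = chocolates.pop(0)
--             return chocolates_recursively(chocolates, students, distribution, index + 1)
--         else:
--             distribution[student] = None
--             return chocolates_recursively(chocolates, students, distribution, index + 1)
--     else:
--         return distribution
-- ===== SOURCE B (Python) =====
-- def chocolates_recursively(chocolates, students, distribution=None, index=0):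
--     # Return-value equivalent to A. Note: A consumes `chocolates` with pop(0);
--     # B reads it by position and leaves it unmutated (return value is identical).
--     if distribution is None:
--         distribution = {}
--     pos = 0
--     for i in range(index, len(students)):
--         distribution[students[i]] = chocolates[pos] if pos < len(chocolates) else None
--         pos += 1
--     return distribution
-- ===== Notes on version B (the rewrite author's own statement) =====
-- stated objective: simpler
-- what changed: Replaces A's recursion (one call per student, consuming chocolates with pop(0)) by a single iterative for-loop over range(index, len(students)) that reads chocolates by position; return value is identical, but B does not mutate the chocolates list.
import Mathlib
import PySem

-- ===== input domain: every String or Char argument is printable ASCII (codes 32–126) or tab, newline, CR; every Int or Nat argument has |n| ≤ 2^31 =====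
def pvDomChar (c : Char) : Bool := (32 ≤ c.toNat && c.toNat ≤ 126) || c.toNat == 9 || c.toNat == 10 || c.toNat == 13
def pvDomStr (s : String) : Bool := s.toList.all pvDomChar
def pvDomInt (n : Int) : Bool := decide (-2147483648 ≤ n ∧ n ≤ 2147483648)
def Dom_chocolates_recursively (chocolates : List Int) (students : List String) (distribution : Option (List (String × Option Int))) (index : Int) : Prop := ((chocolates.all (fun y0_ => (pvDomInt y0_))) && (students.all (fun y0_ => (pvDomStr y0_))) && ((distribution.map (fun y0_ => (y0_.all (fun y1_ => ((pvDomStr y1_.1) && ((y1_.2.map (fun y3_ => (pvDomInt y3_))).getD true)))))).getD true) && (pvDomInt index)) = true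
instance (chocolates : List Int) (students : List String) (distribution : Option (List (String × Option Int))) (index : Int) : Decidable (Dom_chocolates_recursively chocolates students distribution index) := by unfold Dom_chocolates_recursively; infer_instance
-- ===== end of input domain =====

-- B replaces A's recursion-with-pop(0) by one indexed loop over range(index, len(students));
-- return values are equal (A mutates its `chocolates` argument, B does not — return value only).


-- ===== PORT A =====
def chocoGoA (students : List String) (chocolates : List Int)
    (d : PySem.Dict String (Option Int)) (index : Int) : PySem.Dict String (Option Int) :=
  if _h : index < (students.length : Int) then
    match PySem.List.pyGet? students index with
    | none => d  -- students[index] raises IndexError in Python; excluded by Pre_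
    | some student =>
      match chocolates with
      | c :: rest => chocoGoA students rest (d.insert student (some c)) (index + 1)
      | [] => chocoGoA students [] (d.insert student none) (index + 1)
  else d
termination_by ((students.length : Int) - index).toNat
decreasing_by all_goals omega

def chocolates_recursively (chocolates : List Int) (students : List String) (distribution : Option (List (String × Option Int))) (index : Int) : List (String × Option Int) :=
  (chocoGoA students chocolates (PySem.Dict.ofList (distribution.getD [])) index).items


-- ===== PORT B =====
def chocoStepB (students : List String) (chocolates : List Int)
    (s : PySem.Dict String (Option Int) × Int) (i : Int) : PySem.Dict String (Option Int) × Int :=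
  match PySem.List.pyGet? students i with
  | none => s  -- students[i] raises IndexError in Python; excluded by Pre_
  | some student =>
    let v : Option Int := if s.2 < (chocolates.length : Int) then PySem.List.pyGet? chocolates s.2 else none
    (s.1.insert student v, s.2 + 1)

def chocolates_recursively_alt (chocolates : List Int) (students : List String) (distribution : Option (List (String × Option Int))) (index : Int) : List (String × Option Int) :=
  ((PySem.List.pyRange index (students.length : Int) 1).foldl
      (chocoStepB students chocolates)
      (PySem.Dict.ofList (distribution.getD []), 0)).1.items


-- ===== PRECONDITION & SPEC =====
-- Pre_ excludes exactly the inputs where Python A raises IndexError: index < -len(students)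
-- (the first students[index] access is out of range); B raises there too.
def Pre_chocolates_recursively (chocolates : List Int) (students : List String) (distribution : Option (List (String × Option Int))) (index : Int) : Prop :=
  -(students.length : Int) ≤ index
instance (chocolates : List Int) (students : List String) (distribution : Option (List (String × Option Int))) (index : Int) : Decidable (Pre_chocolates_recursively chocolates students distribution index) := by unfold Pre_chocolates_recursively; infer_instance
def pvWitness_chocolates_recursively : List Int × List String × (Option (List (String × Option Int))) × Int := ([1, 2], ["a", "b", "c"], none, 0)
def Spec_chocolates_recursively (chocolates : List Int) (students : List String) (distribution : Option (List (String × Option Int))) (index : Int) (out : List (String × Option Int)) : Prop := out = chocolates_recursively_alt chocolates students distribution index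
instance (chocolates : List Int) (students : List String) (distribution : Option (List (String × Option Int))) (index : Int) (out : List (String × Option Int)) : Decidable (Spec_chocolates_recursively chocolates students distribution index out) := by unfold Spec_chocolates_recursively; infer_instance

-- ===== CLAIM (what is proved, stated in full; the proofs are below) =====
def Claim_equal_chocolates_recursively : Prop := ∀ (chocolates : List Int) (students : List String) (distribution : Option (List (String × Option Int))) (index : Int), Dom_chocolates_recursively chocolates students distribution index → Pre_chocolates_recursively chocolates students distribution index → Spec_chocolates_recursively chocolates students distribution index (chocolates_recursively chocolates students distribution index)

-- ===== LEMMAS AND PROOFS =====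

-- ===== VERDICT (by name: the statement is the Claim_ definition above) =====
lemma choco_go_eq (students : List String) (choc0 : List Int) :
    ∀ (k : Nat) (index : Int) (pos : Nat) (d : PySem.Dict String (Option Int)),
      ((students.length : Int) - index).toNat = k →
      -(students.length : Int) ≤ index →
      chocoGoA students (choc0.drop pos) d index =
      ((PySem.List.pyRange index (students.length : Int) 1).foldl
          (chocoStepB students choc0) (d, (pos : Int))).1 := by
  intro k
  induction k with
  | zero =>
    intro index pos d hk _hlo
    have hge : (students.length : Int) ≤ index := by omega
    rw [PySem.List.pyRange_one_eq_nil hge, chocoGoA]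
    simp only [List.foldl_nil]
    rw [dif_neg (by omega)]
  | succ n ih =>
    intro index pos d hk hlo
    have hlt : index < (students.length : Int) := by omega
    rw [PySem.List.pyRange_one_cons hlt, List.foldl_cons, chocoGoA, dif_pos hlt]
    cases hgs : PySem.List.pyGet? students index with
    | none =>
      exfalso
      rw [PySem.List.pyGet?_eq_none_iff] at hgs
      exact hgs (by simp [PySem.Raise.InRange]; omega)
    | some student =>
      by_cases hp : pos < choc0.length
      · have hstep : chocoStepB students choc0 (d, (pos : Int)) index =
            (d.insert student (some choc0[pos]), ((pos + 1 : Nat) : Int)) := by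
          simp [chocoStepB, hgs, (by exact_mod_cast hp : (pos : Int) < (choc0.length : Int)),
            List.getElem?_eq_getElem hp]
        rw [List.drop_eq_getElem_cons hp, hstep]
        exact ih (index + 1) (pos + 1) (d.insert student (some choc0[pos])) (by omega) (by omega)
      · have hstep : chocoStepB students choc0 (d, (pos : Int)) index =
            (d.insert student none, ((pos + 1 : Nat) : Int)) := by
          simp [chocoStepB, hgs, (by exact_mod_cast hp : ¬ (pos : Int) < (choc0.length : Int))]
        have hnil : choc0.drop pos = [] := List.drop_eq_nil_of_le (by omega)
        have hnil' : choc0.drop (pos + 1) = [] := List.drop_eq_nil_of_le (by omega)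
        rw [hnil, hstep]
        have := ih (index + 1) (pos + 1) (d.insert student none) (by omega) (by omega)
        rwa [hnil'] at this

theorem chocolates_recursively_spec : Claim_equal_chocolates_recursively := by
  intro chocolates students distribution index _hDom hPre
  unfold Spec_chocolates_recursively chocolates_recursively chocolates_recursively_alt
  have h := choco_go_eq students chocolates (((students.length : Int) - index).toNat) index 0
    (PySem.Dict.ofList (distribution.getD [])) rfl hPre
  simpa using congrArg PySem.Dict.items h
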